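-- pv_equiv track=rewrite | github.com/Bandi120424/Algorithm_Python | 백준/Silver/17829. 222－풀링/222－풀링.py | pooling_patch
-- ===== SOURCE A (Python) =====
-- def find_second_component(numbers):
--     numbers.sort(reverse=True)
--     return numbers[1]
--
-- def pooling_patch(pool_size, size, matrix):
--     new_matrix = []
--     for i in range(size//pool_size):
--         row = []
--         for j in range(size//pool_size):
--             row.append(find_second_component([matrix[pool_size*i][pool_size*j], matrix[pool_size*i][pool_size*j+1],
--                                               matrix[pool_size*i+1][pool_size*j], matrix[pool_size*i+1][pool_size*j+1]]))
--         new_matrix.append(row)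
--
--     return new_matrix
-- ===== SOURCE B (Python) =====
-- def pooling_patch(pool_size, size, matrix):
--     n = size // pool_size
--
--     def second_largest(a, b, c, d):
--         # one pass: track largest (hi) and second largest (lo), counting ties
--         hi, lo = (a, b) if b <= a else (b, a)
--         if c > hi:
--             hi, lo = c, hi
--         elif c > lo:
--             lo = c
--         if d > hi:
--             lo = hi
--         elif d > lo:
--             lo = d
--         return lo
--
--     return [[second_largest(matrix[pool_size * i][pool_size * j],
--                             matrix[pool_size * i][pool_size * j + 1],
--                             matrix[pool_size * i + 1][pool_size * j],
--                             matrix[pool_size * i + 1][pool_size * j + 1])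
--              for j in range(n)] for i in range(n)]
-- ===== Notes on version B (the rewrite author's own statement) =====
-- stated objective: simpler
-- what changed: Replaces the helper that builds a 4-element list, sorts it in reverse and indexes [1] with a single-pass largest/second-largest tracker over the four block values, and builds the result with nested comprehensions instead of append loops.
import Mathlib
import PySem

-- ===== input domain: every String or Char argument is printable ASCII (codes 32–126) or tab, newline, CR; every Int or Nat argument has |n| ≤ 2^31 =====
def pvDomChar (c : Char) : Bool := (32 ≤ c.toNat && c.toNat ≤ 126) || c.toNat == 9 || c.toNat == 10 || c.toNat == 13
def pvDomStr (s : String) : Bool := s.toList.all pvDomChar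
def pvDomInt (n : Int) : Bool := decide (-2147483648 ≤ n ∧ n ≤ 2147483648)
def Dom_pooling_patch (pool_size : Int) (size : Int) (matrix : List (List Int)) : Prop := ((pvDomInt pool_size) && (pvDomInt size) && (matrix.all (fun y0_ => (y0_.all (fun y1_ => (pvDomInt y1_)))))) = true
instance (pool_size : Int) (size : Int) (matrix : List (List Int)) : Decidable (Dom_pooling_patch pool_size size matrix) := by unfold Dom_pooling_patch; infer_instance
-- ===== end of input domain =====

-- B replaces the build-sort-index helper with a one-pass largest/second-largest scan and
-- nested comprehensions instead of append loops (objective: simpler).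

-- shared indexing helper: matrix[r][c]; the defaults are unreachable under Pre_
def pvIdx2 (matrix : List (List Int)) (r c : Int) : Int :=
  (PySem.List.pyGet? ((PySem.List.pyGet? matrix r).getD []) c).getD 0

-- ===== PORT A =====
-- numbers.sort(reverse=True); return numbers[1]  (sorts a fresh list literal; the getD
-- default is unreachable: every call site passes a 4-element list)
def find_second_component (numbers : List Int) : Int :=
  (PySem.List.pyGet? (PySem.List.sorted numbers (fun x => x) true) 1).getD 0

def pooling_patch (pool_size : Int) (size : Int) (matrix : List (List Int)) : List (List Int) :=
  (PySem.List.pyRange 0 (PySem.Int.floordiv size pool_size) 1).foldl (fun new_matrix i =>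
    new_matrix ++ [
      (PySem.List.pyRange 0 (PySem.Int.floordiv size pool_size) 1).foldl (fun row j =>
        row ++ [find_second_component
          [pvIdx2 matrix (pool_size*i) (pool_size*j),
           pvIdx2 matrix (pool_size*i) (pool_size*j+1),
           pvIdx2 matrix (pool_size*i+1) (pool_size*j),
           pvIdx2 matrix (pool_size*i+1) (pool_size*j+1)]]) []]) []

-- ===== PORT B =====
-- one pass over the four values, tracking largest (hi) and second largest (lo)
def secondLargest (a b c d : Int) : Int :=
  let p1 := if b ≤ a then (a, b) else (b, a)
  let p2 := if c > p1.1 then (c, p1.1) else if c > p1.2 then (p1.1, c) else p1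
  if d > p2.1 then p2.1 else if d > p2.2 then d else p2.2

def pooling_patch_alt (pool_size : Int) (size : Int) (matrix : List (List Int)) : List (List Int) :=
  let n := PySem.Int.floordiv size pool_size
  (PySem.List.pyRange 0 n 1).map (fun i =>
    (PySem.List.pyRange 0 n 1).map (fun j =>
      secondLargest
        (pvIdx2 matrix (pool_size*i) (pool_size*j))
        (pvIdx2 matrix (pool_size*i) (pool_size*j+1))
        (pvIdx2 matrix (pool_size*i+1) (pool_size*j))
        (pvIdx2 matrix (pool_size*i+1) (pool_size*j+1))))

-- ===== PRECONDITION & SPEC =====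
-- Pre_ excludes the inputs on which the Python A raises (IndexError / ZeroDivisionError):
-- pool_size must be nonzero and, when any block exists, positive with the matrix and every
-- row long enough for the largest accessed index.  Slight stated narrowing: it requires
-- EVERY row to be long enough (not only the rows a block reads) and excludes negative
-- pool_size with blocks, where Python's negative-index wraparound would still return.
def Pre_pooling_patch (pool_size : Int) (size : Int) (matrix : List (List Int)) : Prop :=
  pool_size ≠ 0 ∧ (0 < PySem.Int.floordiv size pool_size →
    1 ≤ pool_size ∧
    pool_size * (PySem.Int.floordiv size pool_size - 1) + 2 ≤ (matrix.length : Int) ∧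
    ∀ r ∈ matrix, pool_size * (PySem.Int.floordiv size pool_size - 1) + 2 ≤ (r.length : Int))
instance (pool_size : Int) (size : Int) (matrix : List (List Int)) : Decidable (Pre_pooling_patch pool_size size matrix) := by unfold Pre_pooling_patch; infer_instance

def pvWitness_pooling_patch : Int × Int × List (List Int) := (2, 2, [[1, 2], [3, 4]])

def Spec_pooling_patch (pool_size : Int) (size : Int) (matrix : List (List Int)) (out : List (List Int)) : Prop := out = pooling_patch_alt pool_size size matrix
instance (pool_size : Int) (size : Int) (matrix : List (List Int)) (out : List (List Int)) : Decidable (Spec_pooling_patch pool_size size matrix out) := by unfold Spec_pooling_patch; infer_instance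

-- ===== CLAIM (what is proved, stated in full; the proofs are below) =====
def Claim_equal_pooling_patch : Prop := ∀ (pool_size : Int) (size : Int) (matrix : List (List Int)), Dom_pooling_patch pool_size size matrix → Pre_pooling_patch pool_size size matrix → Spec_pooling_patch pool_size size matrix (pooling_patch pool_size size matrix)

-- ===== LEMMAS AND PROOFS =====

theorem foldl_app_map {α β : Type} (f : α → β) (xs : List α) (init : List β) :
    xs.foldl (fun acc x => acc ++ [f x]) init = init ++ xs.map f := by
  induction xs generalizing init with
  | nil => simp
  | cons x xs ih => simp [List.foldl, ih]

set_option maxHeartbeats 4000000 in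
theorem second4 (a b c d : Int) :
    find_second_component [a, b, c, d] = secondLargest a b c d := by
  simp only [find_second_component, secondLargest,
    PySem.List.sorted_rev_eq_foldl_insertBy, List.foldl, PySem.List.insertBy]
  split_ifs <;>
    simp_all [PySem.List.insertBy, PySem.List.pyGet?, PySem.List.pyIdx?] <;>
    (repeat' (split_ifs <;> simp_all [PySem.List.insertBy])) <;>
    (try omega) <;> (split_ifs at * <;> simp_all)

theorem pooling_patch_eq (pool_size size : Int) (matrix : List (List Int)) :
    pooling_patch pool_size size matrix = pooling_patch_alt pool_size size matrix := by
  simp only [pooling_patch, pooling_patch_alt, foldl_app_map, List.nil_append, second4]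

-- ===== VERDICT (by name: the statement is the Claim_ definition above) =====
theorem pooling_patch_spec : Claim_equal_pooling_patch := by
  intro pool_size size matrix _ _
  exact pooling_patch_eq pool_size size matrix
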